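-- pv_equiv track=rewrite | github.com/Jc18Jc/Algorithm | graph/맥주마시면서걸어가기.py | incSearch
-- ===== SOURCE A (Python) =====
-- def incSearch(n, array):
--     inc = [[] for _ in range(n+2)]
--     for i in range(n+1):
--         sx, sy = array[i][0], array[i][1]
--         for j in range(i+1, n+2):
--             ex, ey = array[j][0], array[j][1]
--             if abs(ex-sx)+abs(ey-sy) <= 1000:
--                 inc[i].append(j)
--                 inc[j].append(i)
--     return inc
-- ===== SOURCE B (Python) =====
-- def incSearch(n, array):
--     # Rotated-coordinate sweep: with u = x + y, v = x - y, Manhattan distance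
--     # <= 1000 iff |du| <= 1000 and |dv| <= 1000.  Process points in u order and
--     # scan back only while the u-gap is within 1000, then sort each row.
--     m = n + 2
--     order = sorted(range(m), key=lambda k: array[k][0] + array[k][1])
--     inc = [[] for _ in range(m)]
--     done = []  # already-processed indices, u-ascending
--     for k in order:
--         uk = array[k][0] + array[k][1]
--         vk = array[k][0] - array[k][1]
--         for j in reversed(done):
--             if array[j][0] + array[j][1] < uk - 1000:
--                 break  # every earlier point is even farther away in u
--             if abs(vk - (array[j][0] - array[j][1])) <= 1000:
--                 inc[k].append(j)
--                 inc[j].append(k)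
--         done.append(k)
--     for row in inc:
--         row.sort()
--     return inc
-- ===== Notes on version B (the rewrite author's own statement) =====
-- stated objective: alternative
-- what changed: Replaces the all-pairs upper-triangular Manhattan-distance scan with a plane sweep in rotated coordinates (u=x+y, v=x-y; Manhattan<=1000 iff |du|<=1000 and |dv|<=1000): points are processed in sorted u order, each scanning backwards only until the u-gap exceeds 1000, and every adjacency row is sorted at the end.
-- outside the precondition, e.g. on incSearch(-1, []): A returns [[]], B raises IndexError
import Mathlib
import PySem

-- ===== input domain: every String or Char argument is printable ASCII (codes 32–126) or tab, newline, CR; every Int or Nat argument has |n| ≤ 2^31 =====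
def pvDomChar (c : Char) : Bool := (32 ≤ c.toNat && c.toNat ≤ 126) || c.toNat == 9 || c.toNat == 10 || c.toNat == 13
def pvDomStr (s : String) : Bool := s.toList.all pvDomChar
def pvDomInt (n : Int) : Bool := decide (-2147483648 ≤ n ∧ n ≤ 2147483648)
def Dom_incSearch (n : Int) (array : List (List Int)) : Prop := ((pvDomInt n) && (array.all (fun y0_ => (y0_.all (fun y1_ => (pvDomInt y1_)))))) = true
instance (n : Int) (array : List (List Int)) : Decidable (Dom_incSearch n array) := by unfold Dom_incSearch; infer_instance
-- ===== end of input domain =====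

-- B replaces A's all-pairs triangular scan by a plane sweep in rotated coordinates
-- (u = x+y, v = x-y): points are processed in u order, each scanning back only while
-- the u-gap is ≤ 1000, and rows are sorted at the end (alternative algorithm; fewer
-- distance checks when points are spread out).

-- ===== PORT A =====
def incSearch (n : Int) (array : List (List Int)) : List (List Int) :=
  let inc := (PySem.List.pyRange 0 (n+2) 1).map (fun _ => ([] : List Int))
  (PySem.List.pyRange 0 (n+1) 1).foldl (fun inc i =>
    let sx := PySem.List.pyGetD (PySem.List.pyGetD array i []) 0 0
    let sy := PySem.List.pyGetD (PySem.List.pyGetD array i []) 1 0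
    (PySem.List.pyRange (i+1) (n+2) 1).foldl (fun inc j =>
      let ex := PySem.List.pyGetD (PySem.List.pyGetD array j []) 0 0
      let ey := PySem.List.pyGetD (PySem.List.pyGetD array j []) 1 0
      if |ex - sx| + |ey - sy| ≤ (1000 : Int) then
        let inc1 := PySem.List.pySetD inc i (PySem.List.pyGetD inc i [] ++ [j])
        PySem.List.pySetD inc1 j (PySem.List.pyGetD inc1 j [] ++ [i])
      else inc) inc) inc

-- ===== PORT B =====
-- inc[k].append(j); inc[j].append(k)
def pvPairAppend (inc : List (List Int)) (k j : Int) : List (List Int) :=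
  let inc1 := PySem.List.pySetD inc k (PySem.List.pyGetD inc k [] ++ [j])
  PySem.List.pySetD inc1 j (PySem.List.pyGetD inc1 j [] ++ [k])

-- 'for j in reversed(done): if u_j < uk - 1000: break; if |vk - v_j| <= 1000: append pair'
def pvScanBack (array : List (List Int)) (k uk vk : Int) : List Int → List (List Int) → List (List Int)
  | [], inc => inc
  | j :: rest, inc =>
    if PySem.List.pyGetD (PySem.List.pyGetD array j []) 0 0
        + PySem.List.pyGetD (PySem.List.pyGetD array j []) 1 0 < uk - 1000 then
      inc
    else
      pvScanBack array k uk vk rest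
        (if |vk - (PySem.List.pyGetD (PySem.List.pyGetD array j []) 0 0
                   - PySem.List.pyGetD (PySem.List.pyGetD array j []) 1 0)| ≤ (1000 : Int) then
           pvPairAppend inc k j
         else inc)

def incSearch_alt (n : Int) (array : List (List Int)) : List (List Int) :=
  let m := n + 2
  let order := PySem.List.sorted (PySem.List.pyRange 0 m 1)
    (fun k => PySem.List.pyGetD (PySem.List.pyGetD array k []) 0 0
              + PySem.List.pyGetD (PySem.List.pyGetD array k []) 1 0) false
  let st := order.foldl (fun (st : List (List Int) × List Int) k =>
      let uk := PySem.List.pyGetD (PySem.List.pyGetD array k []) 0 0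
                + PySem.List.pyGetD (PySem.List.pyGetD array k []) 1 0
      let vk := PySem.List.pyGetD (PySem.List.pyGetD array k []) 0 0
                - PySem.List.pyGetD (PySem.List.pyGetD array k []) 1 0
      (pvScanBack array k uk vk st.2.reverse st.1, st.2 ++ [k]))
    ((PySem.List.pyRange 0 m 1).map (fun _ => ([] : List Int)), ([] : List Int))
  st.1.map (fun row => PySem.List.sorted row (fun x => x) false)

-- ===== PRECONDITION & SPEC =====
-- Pre_ excludes the inputs on which A raises IndexError (n ≥ 0 with fewer than n+2
-- rows of 2 coordinates) and, additionally, n = -1 with no well-formed first row: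
-- there A ignores `array` and returns [[]], while B's sorting pass reads row 0 and
-- raises IndexError (n = -1 is a degenerate count outside the problem's domain).
def Pre_incSearch (n : Int) (array : List (List Int)) : Prop :=
  n ≤ -2 ∨ (n + 2 ≤ (array.length : Int) ∧ ∀ row ∈ array.take (n+2).toNat, 2 ≤ row.length)
instance (n : Int) (array : List (List Int)) : Decidable (Pre_incSearch n array) := by
  unfold Pre_incSearch; infer_instance

def pvWitness_incSearch : Int × List (List Int) := (1, [[0, 0], [500, 400], [3000, 0]])

def Spec_incSearch (n : Int) (array : List (List Int)) (out : List (List Int)) : Prop := out = incSearch_alt n array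
instance (n : Int) (array : List (List Int)) (out : List (List Int)) : Decidable (Spec_incSearch n array out) := by unfold Spec_incSearch; infer_instance

-- ===== CLAIM (what is proved, stated in full; the proofs are below) =====
def Claim_equal_incSearch : Prop := ∀ (n : Int) (array : List (List Int)), Dom_incSearch n array → Pre_incSearch n array → Spec_incSearch n array (incSearch n array)

-- ===== LEMMAS AND PROOFS =====

-- The common straight-line specification both ports are reduced to:
-- row i lists, in ascending order, all j ≠ i within Manhattan distance 1000.
def pvSpec (n : Int) (array : List (List Int)) : List (List Int) :=
  (PySem.List.pyRange 0 (n+2) 1).map (fun i =>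
    (PySem.List.pyRange 0 (n+2) 1).filter (fun j =>
      decide (j ≠ i) &&
      decide (|PySem.List.pyGetD (PySem.List.pyGetD array j []) 0 0
               - PySem.List.pyGetD (PySem.List.pyGetD array i []) 0 0| +
              |PySem.List.pyGetD (PySem.List.pyGetD array j []) 1 0
               - PySem.List.pyGetD (PySem.List.pyGetD array i []) 1 0| ≤ (1000 : Int))))

def pvG (array : List (List Int)) (k c : Int) : Int :=
  PySem.List.pyGetD (PySem.List.pyGetD array k []) c 0

def pvQ (array : List (List Int)) (k j : Int) : Bool :=
  decide (j ≠ k) &&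
  decide (|pvG array j 0 - pvG array k 0| + |pvG array j 1 - pvG array k 1| ≤ (1000 : Int))

theorem pvQ_symm (array : List (List Int)) (k j : Int) : pvQ array k j = pvQ array j k := by
  unfold pvQ
  rw [abs_sub_comm (pvG array j 0), abs_sub_comm (pvG array j 1)]
  by_cases h : j = k <;> (simp [h]; try (intro _; omega))

theorem pvQ_irrefl (array : List (List Int)) (k : Int) : pvQ array k k = false := by
  simp [pvQ]

def pvC (array : List (List Int)) (a b k j : Int) : Bool :=
  pvQ array k j && decide (min j k < a ∨ (min j k = a ∧ max j k < b))

def pvS (array : List (List Int)) (N a b : Int) : List (List Int) :=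
  (PySem.List.pyRange 0 N 1).map (fun k => (PySem.List.pyRange 0 N 1).filter (pvC array a b k))

theorem pv_setMap (f : Int → List Int) (N i : Int) (v : List Int) (h0 : 0 ≤ i) :
    PySem.List.pySetD ((PySem.List.pyRange 0 N 1).map f) i v
      = (PySem.List.pyRange 0 N 1).map (fun k => if k = i then v else f k) := by
  rw [PySem.List.pySetD_of_nonneg _ v h0]
  apply List.ext_getElem
  · simp
  · intro m hm1 hm2
    simp only [List.getElem_set, List.getElem_map]
    rw [PySem.List.getElem_pyRange_one]
    by_cases he : m = i.toNat
    · have h'' : (0 : Int) + ((i.toNat : Nat) : Int) = i := by omega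
      simp only [he, h'', if_pos]
    · rw [if_neg (by omega), if_neg (by omega)]

theorem pv_filter_snoc (N w : Int) (p q : Int → Bool) (h0 : 0 ≤ w) (hN : w < N)
    (hagree : ∀ x, x ≠ w → q x = p x) (hqw : q w = true) (hpw : p w = false)
    (habove : ∀ x, w < x → p x = false) :
    (PySem.List.pyRange 0 N 1).filter q = (PySem.List.pyRange 0 N 1).filter p ++ [w] := by
  rw [PySem.List.pyRange_one_append 0 w N h0 (by omega),
      PySem.List.pyRange_one_cons (show w < N by omega)]
  rw [List.filter_append, List.filter_append, List.filter_cons, List.filter_cons, hqw, hpw]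
  simp only [if_true]
  have h1 : (PySem.List.pyRange 0 w 1).filter q = (PySem.List.pyRange 0 w 1).filter p := by
    apply List.filter_congr
    intro x hx
    have := (PySem.List.mem_pyRange_one).1 hx
    exact hagree x (by omega)
  have h2 : (PySem.List.pyRange (w+1) N 1).filter q = [] := by
    apply List.filter_eq_nil_iff.2
    intro x hx
    have hxr := (PySem.List.mem_pyRange_one).1 hx
    rw [hagree x (by omega), habove x (by omega)]
    simp
  have h3 : (PySem.List.pyRange (w+1) N 1).filter p = [] := by
    apply List.filter_eq_nil_iff.2
    intro x hx
    have hxr := (PySem.List.mem_pyRange_one).1 hx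
    rw [habove x (by omega)]
    simp
  rw [h1, h2, h3]
  simp

-- inner step of A's loop
theorem pv_inner_step (array : List (List Int)) (n a b : Int) (h0 : 0 ≤ a) (hab : a < b)
    (hbN : b < n + 2) :
    (if |pvG array b 0 - pvG array a 0| + |pvG array b 1 - pvG array a 1| ≤ (1000 : Int) then
        let inc1 := PySem.List.pySetD (pvS array (n+2) a b) a
          (PySem.List.pyGetD (pvS array (n+2) a b) a [] ++ [b])
        PySem.List.pySetD inc1 b (PySem.List.pyGetD inc1 b [] ++ [a])
      else pvS array (n+2) a b) = pvS array (n+2) a (b+1) := by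
  have hQ : pvQ array a b = decide ((|pvG array b 0 - pvG array a 0| + |pvG array b 1 - pvG array a 1| ≤ (1000 : Int))) := by
    unfold pvQ
    rw [decide_eq_true (show b ≠ a by omega), Bool.true_and]
  by_cases hcl : |pvG array b 0 - pvG array a 0| + |pvG array b 1 - pvG array a 1| ≤ (1000 : Int)
  case neg =>
    rw [if_neg hcl]
    unfold pvS
    apply List.map_congr_left
    intro k hk
    apply List.filter_congr
    intro j hj
    unfold pvC
    by_cases hjk : j = k
    · rw [hjk, pvQ_irrefl]; simp
    · by_cases hq : pvQ array k j = true
      · rw [hq, Bool.true_and, Bool.true_and]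
        rw [decide_eq_decide]
        constructor
        · intro h; rcases h with h | h
          · exact Or.inl h
          · exact Or.inr ⟨h.1, by omega⟩
        · intro h; rcases h with h | h
          · exact Or.inl h
          · rcases h with ⟨hmin, hmax⟩
            by_cases hmb : max j k = b
            · exfalso
              have : (j = a ∧ k = b) ∨ (j = b ∧ k = a) := by omega
              rcases this with ⟨hja, hkb⟩ | ⟨hjb, hka⟩
              · rw [hja, hkb] at hq
                rw [pvQ_symm, hQ] at hq
                exact hcl (of_decide_eq_true hq)
              · rw [hjb, hka] at hq
                rw [hQ] at hq
                exact hcl (of_decide_eq_true hq)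
            · exact Or.inr ⟨hmin, by omega⟩
      · rw [Bool.not_eq_true] at hq
        rw [hq]
        simp
  case pos =>
    rw [if_pos hcl]
    have hcb : pvQ array a b = true := by rw [hQ]; exact decide_eq_true hcl
    unfold pvS
    simp only []
    rw [PySem.List.pyGetD_map_pyRange_of_nonneg _ _ _ _ h0 (by omega)]
    rw [pv_setMap _ _ _ _ h0]
    rw [PySem.List.pyGetD_map_pyRange_of_nonneg _ _ _ _ (by omega) (by omega)]
    rw [if_neg (show b ≠ a by omega)]
    rw [pv_setMap _ _ _ _ (by omega)]
    apply List.map_congr_left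
    intro k hk
    have hkr := (PySem.List.mem_pyRange_one).1 hk
    by_cases hkb : k = b
    · rw [if_pos hkb, hkb]
      refine (pv_filter_snoc (n+2) a _ _ h0 (by omega) ?_ ?_ ?_ ?_).symm
      · intro x hx
        unfold pvC
        by_cases hq : pvQ array b x = true
        · rw [hq, Bool.true_and, Bool.true_and]
          rw [decide_eq_decide]
          constructor <;> intro h <;> rcases h with h | h
          · exact Or.inl h
          · exact Or.inr ⟨h.1, by omega⟩
          · exact Or.inl h
          · rcases h with ⟨hmin, hmax⟩
            exact Or.inr ⟨hmin, by omega⟩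
        · rw [Bool.not_eq_true] at hq
          rw [hq]
          simp
      · unfold pvC
        rw [pvQ_symm, hcb, Bool.true_and]
        apply decide_eq_true
        omega
      · unfold pvC
        rw [pvQ_symm, hcb, Bool.true_and]
        apply decide_eq_false
        omega
      · intro x hxa
        unfold pvC
        by_cases hxb : x = b
        · rw [hxb, pvQ_irrefl]; simp
        · rw [Bool.and_eq_false_iff]
          right
          apply decide_eq_false
          omega
    · rw [if_neg hkb]
      by_cases hka : k = a
      · rw [if_pos hka, hka]
        refine (pv_filter_snoc (n+2) b _ _ (by omega) (by omega) ?_ ?_ ?_ ?_).symm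
        · intro x hx
          unfold pvC
          by_cases hq : pvQ array a x = true
          · rw [hq, Bool.true_and, Bool.true_and]
            rw [decide_eq_decide]
            constructor <;> intro h <;> rcases h with h | h
            · exact Or.inl h
            · exact Or.inr ⟨h.1, by omega⟩
            · exact Or.inl h
            · rcases h with ⟨hmin, hmax⟩
              exact Or.inr ⟨hmin, by omega⟩
          · rw [Bool.not_eq_true] at hq
            rw [hq]
            simp
        · unfold pvC
          rw [hcb, Bool.true_and]
          apply decide_eq_true
          omega
        · unfold pvC
          rw [hcb, Bool.true_and]
          apply decide_eq_false
          omega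
        · intro x hxb
          unfold pvC
          by_cases hxa : x = a
          · rw [hxa, pvQ_irrefl]; simp
          · rw [Bool.and_eq_false_iff]
            right
            apply decide_eq_false
            omega
      · rw [if_neg hka]
        apply List.filter_congr
        intro j hj
        unfold pvC
        by_cases hq : pvQ array k j = true
        · rw [hq, Bool.true_and, Bool.true_and]
          rw [decide_eq_decide]
          constructor <;> intro h <;> rcases h with h | h
          · exact Or.inl h
          · exact Or.inr ⟨h.1, by omega⟩
          · exact Or.inl h
          · rcases h with ⟨hmin, hmax⟩
            have hjk : j ≠ k := by
              intro he
              rw [he, pvQ_irrefl] at hq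
              exact Bool.false_ne_true hq
            exact Or.inr ⟨hmin, by omega⟩
        · rw [Bool.not_eq_true] at hq
          rw [hq]
          simp

theorem pv_inner_loop (array : List (List Int)) (n a : Int) (h0 : 0 ≤ a) :
    ∀ (m : Nat) (b : Int), a < b → b ≤ n + 2 → (n + 2 - b).toNat = m →
    (PySem.List.pyRange b (n+2) 1).foldl (fun inc j =>
      let ex := PySem.List.pyGetD (PySem.List.pyGetD array j []) 0 0
      let ey := PySem.List.pyGetD (PySem.List.pyGetD array j []) 1 0
      if |ex - PySem.List.pyGetD (PySem.List.pyGetD array a []) 0 0| +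
         |ey - PySem.List.pyGetD (PySem.List.pyGetD array a []) 1 0| ≤ (1000 : Int) then
        let inc1 := PySem.List.pySetD inc a (PySem.List.pyGetD inc a [] ++ [j])
        PySem.List.pySetD inc1 j (PySem.List.pyGetD inc1 j [] ++ [a])
      else inc) (pvS array (n+2) a b) = pvS array (n+2) a (n+2) := by
  intro m
  induction m with
  | zero =>
    intro b hab hbN hm
    have hb : b = n + 2 := by omega
    rw [hb, PySem.List.pyRange_one_eq_nil (le_refl _)]
    simp
  | succ m ih =>
    intro b hab hbN hm
    have hb : b < n + 2 := by omega
    rw [PySem.List.pyRange_one_cons hb, List.foldl_cons]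
    simp only []
    rw [show (PySem.List.pyGetD (PySem.List.pyGetD array b []) 0 0) = pvG array b 0 from rfl]
    rw [show (PySem.List.pyGetD (PySem.List.pyGetD array b []) 1 0) = pvG array b 1 from rfl]
    rw [show (PySem.List.pyGetD (PySem.List.pyGetD array a []) 0 0) = pvG array a 0 from rfl]
    rw [show (PySem.List.pyGetD (PySem.List.pyGetD array a []) 1 0) = pvG array a 1 from rfl]
    rw [pv_inner_step array n a b h0 hab hb]
    exact ih (b+1) (by omega) (by omega) (by omega)

theorem pv_S_shift (array : List (List Int)) (n a : Int) :
    pvS array (n+2) a (n+2) = pvS array (n+2) (a+1) (a+1+1) := by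
  unfold pvS
  apply List.map_congr_left
  intro k hk
  have hkr := (PySem.List.mem_pyRange_one).1 hk
  apply List.filter_congr
  intro j hj
  have hjr := (PySem.List.mem_pyRange_one).1 hj
  unfold pvC
  by_cases hjk : j = k
  · rw [hjk, pvQ_irrefl]; simp
  · by_cases hq : pvQ array k j = true
    · rw [hq, Bool.true_and, Bool.true_and, decide_eq_decide]
      omega
    · rw [Bool.not_eq_true] at hq
      rw [hq]
      simp

theorem pv_outer_loop (array : List (List Int)) (n : Int) :
    ∀ (m : Nat) (a : Int), 0 ≤ a → a ≤ n + 1 → (n + 1 - a).toNat = m →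
    (PySem.List.pyRange a (n+1) 1).foldl (fun inc i =>
      let sx := PySem.List.pyGetD (PySem.List.pyGetD array i []) 0 0
      let sy := PySem.List.pyGetD (PySem.List.pyGetD array i []) 1 0
      (PySem.List.pyRange (i+1) (n+2) 1).foldl (fun inc j =>
        let ex := PySem.List.pyGetD (PySem.List.pyGetD array j []) 0 0
        let ey := PySem.List.pyGetD (PySem.List.pyGetD array j []) 1 0
        if |ex - sx| + |ey - sy| ≤ (1000 : Int) then
          let inc1 := PySem.List.pySetD inc i (PySem.List.pyGetD inc i [] ++ [j])
          PySem.List.pySetD inc1 j (PySem.List.pyGetD inc1 j [] ++ [i])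
        else inc) inc) (pvS array (n+2) a (a+1)) = pvS array (n+2) (n+1) (n+2) := by
  intro m
  induction m with
  | zero =>
    intro a h0 ha hm
    have : a = n + 1 := by omega
    rw [this, PySem.List.pyRange_one_eq_nil (le_refl _)]
    simp only [List.foldl_nil]
    rw [show (n:Int) + 1 + 1 = n + 2 from by ring]
  | succ m ih =>
    intro a h0 ha hm
    have hlt : a < n + 1 := by omega
    rw [PySem.List.pyRange_one_cons hlt, List.foldl_cons]
    simp only []
    rw [pv_inner_loop array n a h0 (n + 2 - (a+1)).toNat (a+1) (by omega) (by omega) rfl]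
    rw [pv_S_shift array n a]
    exact ih (a+1) (by omega) (by omega) (by omega)

theorem pvA_main (n : Int) (array : List (List Int)) :
    incSearch n array = pvSpec n array := by
  unfold incSearch pvSpec
  simp only []
  by_cases hn : 0 ≤ n
  · have hinit : (PySem.List.pyRange 0 (n+2) 1).map (fun _ => ([] : List Int))
        = pvS array (n+2) 0 (0+1) := by
      unfold pvS
      apply List.map_congr_left
      intro k hk
      have hkr := (PySem.List.mem_pyRange_one).1 hk
      symm
      apply List.filter_eq_nil_iff.2
      intro j hj
      have hjr := (PySem.List.mem_pyRange_one).1 hj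
      unfold pvC
      intro hcontra
      rw [Bool.and_eq_true] at hcontra
      have h2 := of_decide_eq_true hcontra.2
      by_cases hjk : j = k
      · rw [hjk, pvQ_irrefl] at hcontra
        exact Bool.false_ne_true hcontra.1
      · omega
    rw [hinit, pv_outer_loop array n (n + 1 - 0).toNat 0 le_rfl (by omega) rfl]
    unfold pvS
    apply List.map_congr_left
    intro k hk
    have hkr := (PySem.List.mem_pyRange_one).1 hk
    apply List.filter_congr
    intro j hj
    have hjr := (PySem.List.mem_pyRange_one).1 hj
    unfold pvC pvQ pvG
    by_cases hjk : j = k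
    · rw [hjk]
      simp
    · have hmin : decide (min j k < n + 1 ∨ (min j k = n + 1 ∧ max j k < n + 2)) = true :=
        decide_eq_true (Or.inl (by omega))
      rw [hmin, Bool.and_true]
  · rw [PySem.List.pyRange_one_eq_nil (show (n:Int) + 1 ≤ 0 by omega), List.foldl_nil]
    apply List.map_congr_left
    intro k hk
    have hkr := (PySem.List.mem_pyRange_one).1 hk
    symm
    apply List.filter_eq_nil_iff.2
    intro j hj
    have hjr := (PySem.List.mem_pyRange_one).1 hj
    rw [decide_eq_false (show ¬ (j ≠ k) from fun h => h (by omega)), Bool.false_and]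
    simp

-- ======== B-side proof: the sweep also computes pvSpec ========

def pvU (array : List (List Int)) (k : Int) : Int := pvG array k 0 + pvG array k 1
def pvV (array : List (List Int)) (k : Int) : Int := pvG array k 0 - pvG array k 1

-- symmetric closeness predicate in rotated coordinates
def pvClose (array : List (List Int)) (t j : Int) : Bool :=
  decide (j ≠ t) && decide (|pvU array t - pvU array j| ≤ (1000 : Int))
    && decide (|pvV array t - pvV array j| ≤ (1000 : Int))

theorem pvClose_symm (array : List (List Int)) (t j : Int) :
    pvClose array t j = pvClose array j t := by
  unfold pvClose
  rw [abs_sub_comm (pvU array t), abs_sub_comm (pvV array t), decide_eq_decide.mpr ne_comm]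

theorem pvClose_irrefl (array : List (List Int)) (t : Int) : pvClose array t t = false := by
  simp [pvClose]

-- Chebyshev identity: Manhattan distance ≤ 1000 iff both rotated gaps are ≤ 1000
theorem pv_chebyshev (array : List (List Int)) (t j : Int) :
    pvQ array t j = pvClose array t j := by
  unfold pvQ pvClose pvU pvV
  by_cases h : j = t
  · simp [h]
  · rw [decide_eq_true h, Bool.true_and, Bool.true_and]
    rw [Bool.and_comm, ← Bool.decide_and, decide_eq_decide]
    rcases abs_cases (pvG array j 0 - pvG array t 0) with ⟨h1, h1'⟩ | ⟨h1, h1'⟩ <;>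
      rcases abs_cases (pvG array j 1 - pvG array t 1) with ⟨h2, h2'⟩ | ⟨h2, h2'⟩ <;>
      rcases abs_cases (pvG array t 0 + pvG array t 1 - (pvG array j 0 + pvG array j 1)) with ⟨h3, h3'⟩ | ⟨h3, h3'⟩ <;>
      rcases abs_cases (pvG array t 0 - pvG array t 1 - (pvG array j 0 - pvG array j 1)) with ⟨h4, h4'⟩ | ⟨h4, h4'⟩ <;>
      rw [h1, h2, h3, h4] <;> omega

-- row t of the adjacency state after the nodes of p have been processed in order
def pvRowOf (array : List (List Int)) (p : List Int) (t : Int) : List Int :=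
  if t ∈ p then
    ((p.takeWhile (fun x => decide (x ≠ t))).filter (pvClose array t)).reverse
      ++ ((p.dropWhile (fun x => decide (x ≠ t))).tail.filter (pvClose array t))
  else []

def pvIncOf (array : List (List Int)) (m : Int) (p : List Int) : List (List Int) :=
  (PySem.List.pyRange 0 m 1).map (pvRowOf array p)

-- intermediate rows while the pairs found for k are being appended
def pvMidRow (array : List (List Int)) (p : List Int) (k : Int) (done : List Int) (t : Int) : List Int :=
  if t = k then done else pvRowOf array p t ++ (if t ∈ done then [k] else [])

theorem pv_takeWhile_append_all {α : Type} (p : α → Bool) (l r : List α)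
    (h : ∀ x ∈ l, p x = true) : (l ++ r).takeWhile p = l ++ r.takeWhile p := by
  induction l with
  | nil => simp
  | cons x l ih =>
    have hrec := ih (fun y hy => h y (by simp [hy]))
    simp [List.takeWhile_cons, h x (by simp), hrec]

theorem pv_dropWhile_append_all {α : Type} (p : α → Bool) (l r : List α)
    (h : ∀ x ∈ l, p x = true) : (l ++ r).dropWhile p = r.dropWhile p := by
  induction l with
  | nil => simp
  | cons x l ih =>
    simp only [List.cons_append, List.dropWhile_cons, h x (by simp)]
    exact ih (fun y hy => h y (by simp [hy]))

theorem pv_takeWhile_append_stop {α : Type} (p : α → Bool) (l r : List α)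
    (h : ∃ x ∈ l, p x = false) : (l ++ r).takeWhile p = l.takeWhile p := by
  induction l with
  | nil => rcases h with ⟨x, hx, _⟩; cases hx
  | cons x l ih =>
    by_cases hx : p x = true
    · simp only [List.cons_append, List.takeWhile_cons, hx]
      rcases h with ⟨y, hy, hyf⟩
      rcases List.mem_cons.1 hy with hyx | hyl
      · rw [hyx] at hyf; rw [hyf] at hx; cases hx
      · rw [ih ⟨y, hyl, hyf⟩]
    · rw [Bool.not_eq_true] at hx
      simp [List.takeWhile_cons, hx]

theorem pv_dropWhile_append_stop {α : Type} (p : α → Bool) (l r : List α)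
    (h : ∃ x ∈ l, p x = false) : (l ++ r).dropWhile p = l.dropWhile p ++ r := by
  induction l with
  | nil => rcases h with ⟨x, hx, _⟩; cases hx
  | cons x l ih =>
    by_cases hx : p x = true
    · simp only [List.cons_append, List.dropWhile_cons, hx]
      rcases h with ⟨y, hy, hyf⟩
      rcases List.mem_cons.1 hy with hyx | hyl
      · rw [hyx] at hyf; rw [hyf] at hx; cases hx
      · exact ih ⟨y, hyl, hyf⟩
    · rw [Bool.not_eq_true] at hx
      simp [List.dropWhile_cons, hx]

theorem pv_dropWhile_mem (t : Int) (l : List Int) (h : t ∈ l) :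
    l.dropWhile (fun x => decide (x ≠ t)) = t :: (l.dropWhile (fun x => decide (x ≠ t))).tail := by
  induction l with
  | nil => cases h
  | cons x l ih =>
    by_cases hx : x = t
    · simp [List.dropWhile_cons, hx]
    · rw [List.dropWhile_cons, if_pos (by simp [hx])]
      exact ih (by rcases List.mem_cons.1 h with h' | h'; exact absurd h'.symm hx; exact h')

theorem pvRowOf_append_self (array : List (List Int)) (p : List Int) (k : Int) (hk : k ∉ p) :
    pvRowOf array (p ++ [k]) k = (p.filter (pvClose array k)).reverse := by
  unfold pvRowOf
  rw [if_pos (by simp)]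
  have hall : ∀ x ∈ p, (fun x => decide (x ≠ k)) x = true := by
    intro x hx; simp only [decide_eq_true_eq]; intro he; exact hk (he ▸ hx)
  rw [pv_takeWhile_append_all _ _ _ hall, pv_dropWhile_append_all _ _ _ hall]
  simp [List.takeWhile_cons, List.dropWhile_cons]

theorem pvRowOf_append_other (array : List (List Int)) (p : List Int) (k t : Int) (ht : t ≠ k) :
    pvRowOf array (p ++ [k]) t
      = pvRowOf array p t ++ (if t ∈ p ∧ pvClose array t k = true then [k] else []) := by
  unfold pvRowOf
  by_cases hp : t ∈ p
  · have hstop : ∃ x ∈ p, (fun x => decide (x ≠ t)) x = false := ⟨t, hp, by simp⟩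
    rw [if_pos (by simp [hp]), if_pos hp]
    rw [pv_takeWhile_append_stop _ _ _ hstop, pv_dropWhile_append_stop _ _ _ hstop]
    rw [pv_dropWhile_mem t p hp]
    simp only [List.cons_append, List.tail_cons]
    rw [List.filter_append, ← List.append_assoc]
    congr 1
    cases hc : pvClose array t k <;> simp [List.filter_singleton, hc, hp]
  · rw [if_neg hp, if_neg (by simp [hp, ht]), if_neg (fun h => hp h.1)]
    simp

theorem pv_pair_fold (array : List (List Int)) (m k : Int) (p : List Int)
    (hk0 : 0 ≤ k) (hkm : k < m) :
    ∀ (todo done : List Int), (∀ j ∈ todo, 0 ≤ j ∧ j < m ∧ j ≠ k ∧ j ∉ done) → todo.Nodup →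
    todo.foldl (fun inc j => pvPairAppend inc k j)
        ((PySem.List.pyRange 0 m 1).map (pvMidRow array p k done))
      = (PySem.List.pyRange 0 m 1).map (pvMidRow array p k (done ++ todo)) := by
  intro todo
  induction todo with
  | nil => intro done _ _; simp
  | cons j todo ih =>
    intro done hmem hnd
    obtain ⟨hj0, hjm, hjk, hjd⟩ := hmem j (by simp)
    rw [List.foldl_cons]
    have hstep : pvPairAppend ((PySem.List.pyRange 0 m 1).map (pvMidRow array p k done)) k j
        = (PySem.List.pyRange 0 m 1).map (pvMidRow array p k (done ++ [j])) := by
      simp only [pvPairAppend]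
      rw [PySem.List.pyGetD_map_pyRange_of_nonneg _ _ _ _ hk0 hkm]
      rw [show pvMidRow array p k done k = done from by simp [pvMidRow]]
      rw [pv_setMap _ _ _ _ hk0]
      rw [PySem.List.pyGetD_map_pyRange_of_nonneg _ _ _ _ hj0 hjm]
      rw [if_neg hjk]
      rw [show pvMidRow array p k done j = pvRowOf array p j from by
        simp [pvMidRow, hjk, hjd]]
      rw [pv_setMap _ _ _ _ hj0]
      apply List.map_congr_left
      intro t _
      by_cases htj : t = j
      · rw [if_pos htj, htj]
        simp [pvMidRow, hjk]
      · rw [if_neg htj]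
        by_cases htk : t = k
        · rw [if_pos htk, htk]
          simp [pvMidRow]
        · rw [if_neg htk]
          simp only [pvMidRow, if_neg htk]
          congr 1
          have : (t ∈ done ++ [j]) ↔ t ∈ done := by simp [htj]
          by_cases hd : t ∈ done
          · rw [if_pos hd, if_pos (this.mpr hd)]
          · rw [if_neg hd, if_neg (fun h => hd (this.mp h))]
    rw [hstep]
    rw [ih (done ++ [j]) (fun x hx => by
        obtain ⟨a, b, c, d⟩ := hmem x (by simp [hx])
        refine ⟨a, b, c, ?_⟩
        simp only [List.mem_append, List.mem_singleton]
        rintro (h | h)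
        · exact d h
        · exact (List.nodup_cons.1 hnd).1 (h ▸ hx))
      (List.nodup_cons.1 hnd).2]
    rw [List.append_assoc]
    rfl

theorem pv_scan_eq (array : List (List Int)) (k : Int) :
    ∀ (l : List Int) (inc : List (List Int)),
    (∀ j ∈ l, j ≠ k) →
    (∀ j ∈ l, pvU array j ≤ pvU array k) →
    l.Pairwise (fun a b => pvU array b ≤ pvU array a) →
    pvScanBack array k (pvU array k) (pvV array k) l inc
      = (l.filter (pvClose array k)).foldl (fun inc j => pvPairAppend inc k j) inc := by
  intro l
  induction l with
  | nil => intro inc _ _ _; simp [pvScanBack]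
  | cons j rest ih =>
    intro inc hne hle hpw
    have hju : pvU array j ≤ pvU array k := hle j (by simp)
    have hrest : ∀ b ∈ rest, pvU array b ≤ pvU array j := (List.pairwise_cons.1 hpw).1
    rw [show pvScanBack array k (pvU array k) (pvV array k) (j :: rest) inc
        = (if pvU array j < pvU array k - 1000 then inc
           else pvScanBack array k (pvU array k) (pvV array k) rest
             (if |pvV array k - pvV array j| ≤ (1000 : Int) then pvPairAppend inc k j else inc))
      from rfl]
    by_cases hbrk : pvU array j < pvU array k - 1000
    · rw [if_pos hbrk]
      have hnil : (j :: rest).filter (pvClose array k) = [] := by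
        apply List.filter_eq_nil_iff.2
        intro x hx
        have hxu : pvU array x ≤ pvU array j := by
          rcases List.mem_cons.1 hx with h | h
          · rw [h]
          · exact hrest x h
        intro hcontra
        simp only [pvClose, Bool.and_eq_true, decide_eq_true_eq] at hcontra
        obtain ⟨⟨-, habs⟩, -⟩ := hcontra
        have := hle x hx
        rcases abs_le.1 habs with ⟨h1, h2⟩
        omega
      rw [hnil]
      rfl
    · rw [if_neg hbrk]
      have hcl : pvClose array k j = decide (|pvV array k - pvV array j| ≤ (1000 : Int)) := by
        unfold pvClose
        rw [decide_eq_true (hne j (by simp))]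
        rw [decide_eq_true (show |pvU array k - pvU array j| ≤ (1000:Int) from
          abs_le.2 ⟨by omega, by omega⟩)]
        simp
      rw [List.filter_cons]
      by_cases hv : |pvV array k - pvV array j| ≤ (1000 : Int)
      · rw [if_pos hv, if_pos (by rw [hcl]; exact decide_eq_true hv), List.foldl_cons]
        exact ih _ (fun x hx => hne x (by simp [hx])) (fun x hx => hle x (by simp [hx]))
          (List.pairwise_cons.1 hpw).2
      · rw [if_neg hv, if_neg (by simp [hcl, hv])]
        exact ih _ (fun x hx => hne x (by simp [hx])) (fun x hx => hle x (by simp [hx]))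
          (List.pairwise_cons.1 hpw).2

theorem pv_step (array : List (List Int)) (m k : Int) (p : List Int)
    (hk0 : 0 ≤ k) (hkm : k < m) (hkp : k ∉ p)
    (hmem : ∀ j ∈ p, 0 ≤ j ∧ j < m) (hu : ∀ j ∈ p, pvU array j ≤ pvU array k)
    (hnd : p.Nodup) (hpw : p.Pairwise (fun a b => pvU array a ≤ pvU array b)) :
    pvScanBack array k (pvU array k) (pvV array k) p.reverse (pvIncOf array m p)
      = pvIncOf array m (p ++ [k]) := by
  have hinit : pvIncOf array m p = (PySem.List.pyRange 0 m 1).map (pvMidRow array p k []) := by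
    unfold pvIncOf
    apply List.map_congr_left
    intro t _
    by_cases htk : t = k
    · rw [htk]
      simp [pvMidRow, pvRowOf, hkp]
    · simp [pvMidRow, htk]
  rw [hinit]
  rw [pv_scan_eq array k p.reverse _
      (fun j hj he => hkp (he ▸ List.mem_reverse.1 hj))
      (fun j hj => hu j (List.mem_reverse.1 hj))
      (List.pairwise_reverse.2 hpw)]
  rw [pv_pair_fold array m k p hk0 hkm _ []
      (fun j hj => by
        have hjp : j ∈ p := List.mem_reverse.1 (List.mem_filter.1 hj).1
        exact ⟨(hmem j hjp).1, (hmem j hjp).2, fun he => hkp (he ▸ hjp), by simp⟩)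
      ((List.nodup_reverse.2 hnd).filter _)]
  apply List.map_congr_left
  intro t _
  by_cases htk : t = k
  · rw [htk]
    simp only [pvMidRow, if_pos rfl, List.nil_append]
    rw [List.filter_reverse]
    exact (pvRowOf_append_self array p k hkp).symm
  · simp only [pvMidRow, if_neg htk, List.nil_append]
    rw [pvRowOf_append_other array p k t htk]
    congr 1
    have hmemL : t ∈ p.reverse.filter (pvClose array k) ↔ (t ∈ p ∧ pvClose array t k = true) := by
      rw [List.mem_filter, List.mem_reverse, pvClose_symm array k t]
    by_cases hc : t ∈ p ∧ pvClose array t k = true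
    · rw [if_pos (hmemL.mpr hc), if_pos hc]
    · rw [if_neg (fun h => hc (hmemL.mp h)), if_neg hc]

theorem pv_loop (array : List (List Int)) (m : Int) :
    ∀ (q p : List Int),
    (p ++ q).Pairwise (fun a b => pvU array a ≤ pvU array b) → (p ++ q).Nodup →
    (∀ j ∈ p ++ q, 0 ≤ j ∧ j < m) →
    q.foldl (fun (st : List (List Int) × List Int) k =>
        (pvScanBack array k (pvU array k) (pvV array k) st.2.reverse st.1, st.2 ++ [k]))
      (pvIncOf array m p, p)
      = (pvIncOf array m (p ++ q), p ++ q) := by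
  intro q
  induction q with
  | nil => intro p _ _ _; simp
  | cons k q ih =>
    intro p hpw hnd hmem
    rw [List.foldl_cons]
    have hpw1 : ∀ j ∈ p, pvU array j ≤ pvU array k := by
      intro j hj
      have := (List.pairwise_append.1 hpw).2.2
      exact this j hj k (by simp)
    have hkp : k ∉ p := by
      intro hk
      exact (List.nodup_append.1 hnd).2.2 k hk k (by simp) rfl
    have hk0 := hmem k (by simp)
    simp only []
    rw [pv_step array m k p hk0.1 hk0.2 hkp
        (fun j hj => hmem j (by simp [hj])) hpw1
        (List.nodup_append.1 hnd).1 (List.pairwise_append.1 hpw).1]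
    have := ih (p ++ [k])
      (by rwa [List.append_assoc, List.singleton_append])
      (by rwa [List.append_assoc, List.singleton_append])
      (by rw [List.append_assoc, List.singleton_append]; exact hmem)
    simpa using this

theorem pvB_main (n : Int) (array : List (List Int)) :
    incSearch_alt n array = pvSpec n array := by
  have hperm : (PySem.List.sorted (PySem.List.pyRange 0 (n+2) 1) (fun k => pvU array k) false).Perm
      (PySem.List.pyRange 0 (n+2) 1) := PySem.List.sorted_perm _ _ _
  have hpair : (PySem.List.sorted (PySem.List.pyRange 0 (n+2) 1) (fun k => pvU array k) false).Pairwise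
      (fun a b => pvU array a ≤ pvU array b) := PySem.List.sorted_pairwise _ _
  have hnd : (PySem.List.sorted (PySem.List.pyRange 0 (n+2) 1) (fun k => pvU array k) false).Nodup :=
    hperm.nodup_iff.mpr (PySem.List.nodup_pyRange_one 0 (n+2))
  have hmem : ∀ j ∈ PySem.List.sorted (PySem.List.pyRange 0 (n+2) 1) (fun k => pvU array k) false,
      0 ≤ j ∧ j < n + 2 := by
    intro j hj
    have := (PySem.List.mem_pyRange_one).1 (hperm.subset hj)
    omega
  simp only [incSearch_alt]
  have hinit : (List.map (fun x => ([] : List Int)) (PySem.List.pyRange 0 (n+2) 1))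
      = pvIncOf array (n+2) [] := by
    unfold pvIncOf
    apply List.map_congr_left
    intro t _
    simp [pvRowOf]
  rw [hinit]
  show (List.map (fun row => PySem.List.sorted row (fun x => x) false)
      ((PySem.List.sorted (PySem.List.pyRange 0 (n+2) 1) (fun k => pvU array k) false).foldl
        (fun (st : List (List Int) × List Int) k =>
          (pvScanBack array k (pvU array k) (pvV array k) st.2.reverse st.1, st.2 ++ [k]))
        (pvIncOf array (n+2) [], [])).1) = pvSpec n array
  rw [pv_loop array (n+2)
      (PySem.List.sorted (PySem.List.pyRange 0 (n+2) 1) (fun k => pvU array k) false) []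
      (by simpa using hpair) (by simpa using hnd) (by simpa using hmem)]
  simp only [List.nil_append]
  unfold pvIncOf pvSpec
  rw [List.map_map]
  apply List.map_congr_left
  intro t ht
  have htR := (PySem.List.mem_pyRange_one).1 ht
  have htO : t ∈ PySem.List.sorted (PySem.List.pyRange 0 (n+2) 1) (fun k => pvU array k) false :=
    hperm.mem_iff.mpr ht
  simp only [Function.comp_apply]
  have hfilt : (PySem.List.pyRange 0 (n+2) 1).filter (fun j =>
        decide (j ≠ t) &&
        decide (|PySem.List.pyGetD (PySem.List.pyGetD array j []) 0 0
                 - PySem.List.pyGetD (PySem.List.pyGetD array t []) 0 0| +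
                |PySem.List.pyGetD (PySem.List.pyGetD array j []) 1 0
                 - PySem.List.pyGetD (PySem.List.pyGetD array t []) 1 0| ≤ (1000 : Int)))
      = (PySem.List.pyRange 0 (n+2) 1).filter (pvClose array t) := by
    apply List.filter_congr
    intro j _
    rw [show (decide (j ≠ t) &&
        decide (|PySem.List.pyGetD (PySem.List.pyGetD array j []) 0 0
                 - PySem.List.pyGetD (PySem.List.pyGetD array t []) 0 0| +
                |PySem.List.pyGetD (PySem.List.pyGetD array j []) 1 0
                 - PySem.List.pyGetD (PySem.List.pyGetD array t []) 1 0| ≤ (1000 : Int)))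
      = pvQ array t j from rfl, pv_chebyshev]
  rw [hfilt]
  apply PySem.List.sorted_eq_of_perm_of_pairwise_lt
  · -- the ascending filtered range is a permutation of the produced row
    have hdw := pv_dropWhile_mem t _ htO
    have hsplit : PySem.List.sorted (PySem.List.pyRange 0 (n+2) 1) (fun k => pvU array k) false
        = (PySem.List.sorted (PySem.List.pyRange 0 (n+2) 1) (fun k => pvU array k) false).takeWhile (fun x => decide (x ≠ t))
          ++ t :: ((PySem.List.sorted (PySem.List.pyRange 0 (n+2) 1) (fun k => pvU array k) false).dropWhile (fun x => decide (x ≠ t))).tail := by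
      conv_lhs => rw [← List.takeWhile_append_dropWhile
        (p := fun x => decide (x ≠ t))
        (l := PySem.List.sorted (PySem.List.pyRange 0 (n+2) 1) (fun k => pvU array k) false)]
      conv_lhs => rw [hdw]
    have h2 : List.filter (pvClose array t)
          (PySem.List.sorted (PySem.List.pyRange 0 (n+2) 1) (fun k => pvU array k) false)
        = List.filter (pvClose array t)
            ((PySem.List.sorted (PySem.List.pyRange 0 (n+2) 1) (fun k => pvU array k) false).takeWhile (fun x => decide (x ≠ t)))
          ++ List.filter (pvClose array t)
            (((PySem.List.sorted (PySem.List.pyRange 0 (n+2) 1) (fun k => pvU array k) false).dropWhile (fun x => decide (x ≠ t))).tail) := by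
      conv_lhs => rw [hsplit]
      rw [List.filter_append, List.filter_cons, pvClose_irrefl]
      rfl
    refine (List.Perm.filter _ hperm.symm).trans ?_
    rw [h2]
    unfold pvRowOf
    rw [if_pos htO]
    exact List.Perm.append_right _ (List.reverse_perm _).symm
  · exact List.Pairwise.filter _ (PySem.List.pairwise_lt_pyRange_one 0 (n+2))

-- ===== VERDICT (by name: the statement is the Claim_ definition above) =====
theorem incSearch_spec : Claim_equal_incSearch := by
  intro n array _ _
  unfold Spec_incSearch
  rw [pvA_main, ← pvB_main]
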